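-- pv_equiv track=rewrite | github.com/OCWC22/rlm-mcp-server | gepa/_diagnostics/trace_to_dataset.py | _split_terminal
-- ===== SOURCE A (Python) =====
-- from typing import Any
--
-- TERMINAL_TOOLS = {"rlm_get_buffers", "rlm_status", "rlm_list_sessions", "rlm_reset"}
--
-- def _split_terminal(records: list[dict[str, Any]]) -> list[list[dict[str, Any]]]:
--     out: list[list[dict[str, Any]]] = []
--     cur: list[dict[str, Any]] = []
--     for rec in records:
--         cur.append(rec)
--         if rec.get("tool") in TERMINAL_TOOLS:
--             out.append(cur)
--             cur = []
--     if cur: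
--         out.append(cur)
--     return out
-- ===== SOURCE B (Python) =====
-- from typing import Any
--
-- TERMINAL_TOOLS = {"rlm_get_buffers", "rlm_status", "rlm_list_sessions", "rlm_reset"}
--
-- def _split_terminal(records: list[dict[str, Any]]) -> list[list[dict[str, Any]]]:
--     # Repeatedly cut off the prefix up to and including the FIRST terminal record.
--     out: list[list[dict[str, Any]]] = []
--     rest = records
--     while True:
--         idx = next((i for i, rec in enumerate(rest)
--                     if rec.get("tool") in TERMINAL_TOOLS), None)
--         if idx is None:
--             break
--         out.append(rest[:idx + 1])
--         rest = rest[idx + 1:]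
--     if rest:
--         out.append(rest)
--     return out
-- ===== Notes on version B (the rewrite author's own statement) =====
-- stated objective: alternative
-- what changed: A accumulates records into a current group and flushes it at each terminal tool; B instead repeatedly finds the index of the first terminal record and cuts off the slice up to and including it, appending the non-empty remainder at the end.
import Mathlib
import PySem

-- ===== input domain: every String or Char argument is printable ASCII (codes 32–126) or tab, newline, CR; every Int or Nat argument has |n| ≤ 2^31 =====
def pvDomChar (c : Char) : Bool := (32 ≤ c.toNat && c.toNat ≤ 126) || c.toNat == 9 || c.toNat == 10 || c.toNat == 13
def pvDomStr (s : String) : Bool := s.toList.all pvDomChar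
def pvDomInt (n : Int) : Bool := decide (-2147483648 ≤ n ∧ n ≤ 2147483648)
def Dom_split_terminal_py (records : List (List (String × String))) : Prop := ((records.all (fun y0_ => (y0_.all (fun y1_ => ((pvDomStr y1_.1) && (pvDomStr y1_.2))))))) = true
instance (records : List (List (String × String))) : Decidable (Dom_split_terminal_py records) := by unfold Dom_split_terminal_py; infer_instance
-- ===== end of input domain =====

-- B replaces A's accumulate-then-flush pass by repeatedly cutting the prefix up to and
-- including the first terminal record (alternative decomposition, same cost).

-- TERMINAL_TOOLS (a Python set of string literals; only membership is used)
def pvTerminalTools : PySem.Set String :=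
  PySem.Set.ofList ["rlm_get_buffers", "rlm_status", "rlm_list_sessions", "rlm_reset"]

-- rec.get("tool") in TERMINAL_TOOLS  (None, i.e. a missing key, is never in the set)
def pvIsTerminal (rec : List (String × String)) : Bool :=
  match PySem.Dict.get? (PySem.Dict.mk rec) "tool" with
  | some t => PySem.Set.contains pvTerminalTools t
  | none => false

-- ===== PORT A =====
def split_terminal_py (records : List (List (String × String))) : List (List (List (String × String))) :=
  let st := records.foldl
    (fun (st : List (List (List (String × String))) × List (List (String × String))) rec =>
      let cur := st.2 ++ [rec]
      if pvIsTerminal rec then (st.1 ++ [cur], []) else (st.1, cur))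
    ([], [])
  if st.2.isEmpty then st.1 else st.1 ++ [st.2]

-- ===== PORT B =====
-- next((i for i, rec in enumerate(rest) if …), None) is rest.findIdx? pvIsTerminal;
-- rest[:idx+1] / rest[idx+1:] are take/drop (the slice bounds are nonnegative and in range, exact here).
def split_terminal_py_alt (records : List (List (String × String))) : List (List (List (String × String))) :=
  match h : records.findIdx? pvIsTerminal with
  | none => if records.isEmpty then [] else [records]
  | some i => records.take (i + 1) :: split_terminal_py_alt (records.drop (i + 1))
termination_by records.length
decreasing_by
  simp only [List.length_drop]
  have hi : i < records.length := (List.findIdx?_eq_some_iff_findIdx_eq.mp h).1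
  omega

-- ===== PRECONDITION & SPEC =====
def Spec_split_terminal_py (records : List (List (String × String))) (out : List (List (List (String × String)))) : Prop := out = split_terminal_py_alt records
instance (records : List (List (String × String))) (out : List (List (List (String × String)))) : Decidable (Spec_split_terminal_py records out) := by unfold Spec_split_terminal_py; infer_instance

-- ===== CLAIM (what is proved, stated in full; the proofs are below) =====
def Claim_equal_split_terminal_py : Prop := ∀ (records : List (List (String × String))), Dom_split_terminal_py records → Spec_split_terminal_py records (split_terminal_py records)

-- ===== LEMMAS AND PROOFS =====

-- B on a list with no terminal record
theorem alt_no_terminal (rs : List (List (String × String)))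
    (h : ∀ x ∈ rs, pvIsTerminal x = false) :
    split_terminal_py_alt rs = if rs.isEmpty then [] else [rs] := by
  have hn : rs.findIdx? pvIsTerminal = none := by
    rw [List.findIdx?_eq_none_iff]; simpa using h
  rw [split_terminal_py_alt]
  split
  · rfl
  · rename_i i hi; rw [hn] at hi; exact absurd hi (by simp)

-- B on cur ++ r :: rs where cur holds no terminal record and r is terminal
theorem alt_first_terminal (cur rs : List (List (String × String)))
    (r : List (String × String))
    (hcur : ∀ x ∈ cur, pvIsTerminal x = false) (hr : pvIsTerminal r = true) :
    split_terminal_py_alt (cur ++ r :: rs) = (cur ++ [r]) :: split_terminal_py_alt rs := by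
  have hfc : cur.findIdx? pvIsTerminal = none := by
    rw [List.findIdx?_eq_none_iff]; simpa using hcur
  have hf : (cur ++ r :: rs).findIdx? pvIsTerminal = some cur.length := by
    rw [List.findIdx?_append, hfc, List.findIdx?_cons, hr]
    simp
  rw [split_terminal_py_alt]
  split
  · rename_i h; rw [hf] at h; exact absurd h (by simp)
  · rename_i i h; rw [hf] at h
    obtain rfl : cur.length = i := by simpa using h
    congr 1
    · simp [List.take_append]
    · congr 1
      simp [List.drop_append]

-- the loop invariant: A's fold from state (out, cur), cur terminal-free,
-- produces out ++ B (cur ++ rs)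
theorem main_invariant (rs : List (List (String × String)))
    (out : List (List (List (String × String))))
    (cur : List (List (String × String)))
    (hcur : ∀ x ∈ cur, pvIsTerminal x = false) :
    (let st := rs.foldl
        (fun (st : List (List (List (String × String))) × List (List (String × String))) rec =>
          let c := st.2 ++ [rec]
          if pvIsTerminal rec then (st.1 ++ [c], []) else (st.1, c))
        (out, cur)
     ; if st.2.isEmpty then st.1 else st.1 ++ [st.2])
      = out ++ split_terminal_py_alt (cur ++ rs) := by
  induction rs generalizing out cur with
  | nil =>
    simp only [List.foldl_nil, List.append_nil]
    rw [alt_no_terminal cur hcur]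
    cases cur with
    | nil => simp
    | cons c cs => simp
  | cons r rs ih =>
    simp only [List.foldl_cons]
    by_cases hr : pvIsTerminal r = true
    · simp only [hr, if_pos]
      rw [ih (out ++ [cur ++ [r]]) [] (by simp)]
      rw [alt_first_terminal cur rs r hcur hr]
      simp
    · simp only [Bool.not_eq_true] at hr
      simp only [hr, Bool.false_eq_true, if_neg, not_false_iff]
      rw [ih out (cur ++ [r]) (by intro x hx; rcases List.mem_append.mp hx with h | h
                                  · exact hcur x h
                                  · simp at h; subst h; exact hr)]
      simp

-- ===== VERDICT (by name: the statement is the Claim_ definition above) =====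
theorem split_terminal_py_spec : Claim_equal_split_terminal_py := by
  intro records _
  show split_terminal_py records = split_terminal_py_alt records
  unfold split_terminal_py
  have := main_invariant records [] [] (by simp)
  simpa using this
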